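-- pv_equiv track=rewrite | github.com/cwhy/rwkv-decon | gpt_recon/clean_frame_utils.py | squeeze_side
-- ===== SOURCE A (Python) =====
-- def squeeze_side(s: tuple[int, ...]) -> tuple[int, ...]:
--     assert len(s) > 0, "Empty shape cannot be squeezed"
--     if len(s) == 1:
--         return s
--     if s[0] == 1:
--         return squeeze_side(s[1:])
--     if s[-1] == 1:
--         return squeeze_side(s[:-1])
--     return s
-- ===== SOURCE B (Python) =====
-- def squeeze_side(s: tuple[int, ...]) -> tuple[int, ...]:
--     assert len(s) > 0, "Empty shape cannot be squeezed"
--     i = 0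
--     while i < len(s) and s[i] == 1:
--         i += 1
--     j = len(s)
--     while j > i and s[j - 1] == 1:
--         j -= 1
--     return s[i:j] if i < j else (1,)
-- ===== Notes on version B (the rewrite author's own statement) =====
-- stated objective: alternative
-- what changed: Replaced A's one-element-at-a-time tail recursion by a single non-recursive two-index scan that finds the first and last non-1 entries and returns one slice (an all-ones shape still keeps one element, as in A).
import Mathlib
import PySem

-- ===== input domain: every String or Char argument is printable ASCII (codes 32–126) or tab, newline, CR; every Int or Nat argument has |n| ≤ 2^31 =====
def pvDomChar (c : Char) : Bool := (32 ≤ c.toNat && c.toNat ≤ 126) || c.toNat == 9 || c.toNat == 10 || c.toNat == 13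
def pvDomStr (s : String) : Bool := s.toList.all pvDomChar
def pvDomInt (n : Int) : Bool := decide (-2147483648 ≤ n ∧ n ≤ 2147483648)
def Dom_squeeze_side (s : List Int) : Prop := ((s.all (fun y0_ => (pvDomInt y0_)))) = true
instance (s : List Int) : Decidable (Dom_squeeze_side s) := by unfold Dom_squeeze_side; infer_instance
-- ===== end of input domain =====

-- B replaces A's one-element-at-a-time tail recursion by a single non-recursive
-- two-ended strip (first/last non-1 entry, one slice); equivalence of the return values is proved below.

-- ===== PORT A =====
-- literal port of A's recursion; s[1:] on a nonempty list is .tail, s[:-1] is .dropLast,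
-- s[0]/s[-1] via PySem.List.pyGet? (exact).  [] is unreachable under Pre_ (Python asserts).
def squeeze_side (s : List Int) : List Int :=
  if s.length = 1 then s
  else if PySem.List.pyGet? s 0 = some 1 then squeeze_side (PySem.List.slice s (some 1) none)
  else if PySem.List.pyGet? s (-1) = some 1 then squeeze_side (PySem.List.slice s none (some (-1)))
  else s
termination_by s.length
decreasing_by
  · rename_i h1 h2
    simp [PySem.List.slice_from_one]
    cases s with
    | nil => simp [PySem.List.pyGet?, PySem.List.pyIdx?] at h2
    | cons a t => simp
  · rename_i h1 h2 h3
    simp [PySem.List.slice_to_neg_one]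
    cases s with
    | nil => simp [PySem.List.pyGet?, PySem.List.pyIdx?] at h3
    | cons a t => simp

-- ===== PORT B =====
-- the first while loop (advance i past leading 1s) is the front dropWhile;
-- the second (retreat j past trailing 1s) is the dropWhile on the reverse; s[i:j] is u.
def squeeze_side_alt (s : List Int) : List Int :=
  let t := s.dropWhile (· == 1)
  let u := (t.reverse.dropWhile (· == 1)).reverse
  if u.isEmpty then [1] else u

-- ===== PRECONDITION & SPEC =====
-- Pre_ excludes only the empty list, on which A's assert raises AssertionError.
def Pre_squeeze_side (s : List Int) : Prop := s ≠ []
instance (s : List Int) : Decidable (Pre_squeeze_side s) := by unfold Pre_squeeze_side; infer_instance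
def pvWitness_squeeze_side : List Int := [1, 3, 1]

def Spec_squeeze_side (s : List Int) (out : List Int) : Prop := out = squeeze_side_alt s
instance (s : List Int) (out : List Int) : Decidable (Spec_squeeze_side s out) := by unfold Spec_squeeze_side; infer_instance

-- ===== CLAIM (what is proved, stated in full; the proofs are below) =====
def Claim_equal_squeeze_side : Prop := ∀ (s : List Int), Dom_squeeze_side s → Pre_squeeze_side s → Spec_squeeze_side s (squeeze_side s)

-- ===== LEMMAS AND PROOFS =====

-- alt ignores a leading 1 when something follows
theorem alt_cons_one (a : Int) (t : List Int) :
    squeeze_side_alt (1 :: t) = squeeze_side_alt t := by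
  simp [squeeze_side_alt]

-- alt ignores a trailing 1 when the head is not 1
theorem alt_snoc_one (u : List Int) (hu : u ≠ []) (h0 : u.head hu ≠ 1) :
    squeeze_side_alt (u ++ [1]) = squeeze_side_alt u := by
  have hdw : u.dropWhile (· == 1) = u := by
    cases u with
    | nil => exact absurd rfl hu
    | cons a t => simp_all [List.dropWhile_cons]
  have hdw' : (u ++ [1]).dropWhile (· == 1) = u ++ [1] := by
    cases u with
    | nil => exact absurd rfl hu
    | cons a t => simp_all [List.dropWhile_cons]
  simp [squeeze_side_alt, hdw, hdw', List.reverse_append, List.dropWhile_cons]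

theorem main_lemma : ∀ (n : Nat) (s : List Int), s.length ≤ n → s ≠ [] →
    squeeze_side s = squeeze_side_alt s := by
  intro n
  induction n with
  | zero => intro s hl hne; cases s <;> simp_all
  | succ m ih =>
    intro s hl hne
    match s, hne with
    | [a], _ =>
      rw [squeeze_side]
      simp only [List.length_singleton, if_pos rfl]
      by_cases h : a = 1 <;> simp [squeeze_side_alt, h]
    | a :: b :: t, _ =>
      rw [squeeze_side]
      have hlen : (a :: b :: t).length ≠ 1 := by simp
      rw [if_neg hlen]
      by_cases h0 : a = 1
      · subst h0
        rw [if_pos (by simp [PySem.List.pyGet?_zero_cons])]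
        rw [PySem.List.slice_from_one]
        simp only [List.tail_cons]
        rw [ih (b :: t) (by simp at hl ⊢; omega) (by simp), alt_cons_one 1 (b :: t)]
      · rw [if_neg (by simp [PySem.List.pyGet?_zero_cons, h0])]
        obtain ⟨u, x, hux⟩ : ∃ u x, a :: b :: t = u ++ [x] := by
          rcases List.eq_nil_or_concat (l := a :: b :: t) with h | ⟨u, x, h⟩
          · simp at h
          · exact ⟨u, x, by simpa [List.concat_eq_append] using h⟩
        obtain ⟨v, hv⟩ : ∃ v, u = a :: v := by
          cases u with
          | nil =>
            have := congrArg List.length hux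
            simp at this
          | cons c w =>
            injection hux with h1 _
            exact ⟨w, by rw [h1]⟩
        have hune : u ≠ [] := by simp [hv]
        have hget : PySem.List.pyGet? (a :: b :: t) (-1) = some x := by
          rw [hux]; exact PySem.List.pyGet?_neg_one_append_singleton u x
        by_cases hx : x = 1
        · subst hx
          rw [if_pos hget, PySem.List.slice_to_neg_one, hux, List.dropLast_concat]
          have hhead : u.head hune ≠ 1 := by simp [hv, h0]
          rw [ih u (by have := congrArg List.length hux; simp at this hl ⊢; omega) hune]
          rw [alt_snoc_one u hune hhead]
        · rw [if_neg (by simp [hget, hx])]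
          have hdw : (a :: b :: t).dropWhile (· == 1) = a :: b :: t := by
            simp [List.dropWhile_cons, h0]
          have hrdw : ((a :: b :: t).reverse).dropWhile (· == 1) = (a :: b :: t).reverse := by
            rw [hux, List.reverse_append]
            simp [List.dropWhile_cons, hx]
          simp only [squeeze_side_alt, hdw, hrdw]
          simp

-- ===== VERDICT (by name: the statement is the Claim_ definition above) =====
theorem squeeze_side_spec : Claim_equal_squeeze_side := by
  intro s _ hpre
  unfold Spec_squeeze_side
  exact (main_lemma s.length s le_rfl hpre).symm ▸ rfl
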